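-- pv_equiv track=rewrite | github.com/Biblosphere/repo | cloud/books.py | count_missing
-- ===== SOURCE A (Python) =====
-- def count_missing(s1, r1):
--     deletions = 0
--     trunc1 = (' '.join(r1)).split()
--
--     in_missing = False
--     for w in s1:
--         # For missing word find whole missing sequence words
--         if w not in trunc1:
--             if not in_missing:
--                 deletions += 1
--                 in_missing = True
--         else:
--             if in_missing:
--                 in_missing = False
--
--     return deletions
-- ===== SOURCE B (Python) =====
-- def count_missing(s1, r1):
--     ref = set((' '.join(r1)).split())
--     flags = [w not in ref for w in s1]
--     prevs = [False] + flags[:-1]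
--     return sum(1 for f, p in zip(flags, prevs) if f and not p)
-- ===== Notes on version B (the rewrite author's own statement) =====
-- stated objective: faster
-- what changed: Replaces the manual in_missing state machine with an O(|r1|) list membership test per word by a reference word set plus a membership-flag list whose rising edges are counted over zip(flags, shifted flags).
import Mathlib
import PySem

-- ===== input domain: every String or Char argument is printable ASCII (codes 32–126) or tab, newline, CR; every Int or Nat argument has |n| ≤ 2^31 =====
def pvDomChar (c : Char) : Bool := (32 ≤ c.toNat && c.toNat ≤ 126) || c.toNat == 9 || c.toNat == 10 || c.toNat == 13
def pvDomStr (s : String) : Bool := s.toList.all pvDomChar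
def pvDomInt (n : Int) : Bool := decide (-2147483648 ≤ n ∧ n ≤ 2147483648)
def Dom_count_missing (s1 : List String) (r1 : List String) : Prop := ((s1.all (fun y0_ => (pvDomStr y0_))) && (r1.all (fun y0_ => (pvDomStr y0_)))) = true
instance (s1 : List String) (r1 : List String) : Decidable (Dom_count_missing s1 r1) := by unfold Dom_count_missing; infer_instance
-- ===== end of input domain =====

-- B replaces A's manual in_missing state machine (repeated list membership) by a reference word set,
-- a membership-flag list and a rising-edge count over zipped flags (idiomatic decomposition).


-- ===== PORT A =====
def count_missing (s1 : List String) (r1 : List String) : Int :=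
  let trunc1 := PySem.Str.split₀ (PySem.Str.join " " r1)
  let st := s1.foldl (fun (st : Int × Bool) w =>
      if ¬ (trunc1.contains w) then
        (if ¬ st.2 then (st.1 + 1, true) else st)
      else
        (if st.2 then (st.1, false) else st)) (0, false)
  st.1

-- ===== PORT B =====
def count_missing_alt (s1 : List String) (r1 : List String) : Int :=
  let ref : PySem.Set String := PySem.Set.ofList (PySem.Str.split₀ (PySem.Str.join " " r1))
  let flags := s1.map (fun w => !(PySem.Set.contains ref w))
  let prevs := false :: flags.dropLast   -- [False] + flags[:-1]
  (((flags.zip prevs).filter (fun fp => fp.1 && !fp.2)).length : Int)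

-- ===== PRECONDITION & SPEC =====
def Spec_count_missing (s1 : List String) (r1 : List String) (out : Int) : Prop := out = count_missing_alt s1 r1
instance (s1 : List String) (r1 : List String) (out : Int) : Decidable (Spec_count_missing s1 r1 out) := by unfold Spec_count_missing; infer_instance

-- ===== CLAIM (what is proved, stated in full; the proofs are below) =====
def Claim_equal_count_missing : Prop := ∀ (s1 : List String) (r1 : List String), Dom_count_missing s1 r1 → Spec_count_missing s1 r1 (count_missing s1 r1)

-- ===== LEMMAS AND PROOFS =====

-- zip only looks at the first (length of the first list) elements of the second list
theorem zip_cons_dropLast (l : List Bool) (a : Bool) :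
    l.zip (a :: l.dropLast) = l.zip (a :: l) := by
  induction l generalizing a with
  | nil => rfl
  | cons b t ih =>
    cases t with
    | nil => rfl
    | cons c u =>
      have h := ih b
      simp only [List.dropLast_cons₂, List.zip_cons_cons, List.cons.injEq, true_and] at h ⊢
      exact h

-- A's loop over the flag sequence counts rising edges
theorem foldA_eq (flags : List Bool) (d : Int) (prev : Bool) :
    (flags.foldl (fun (st : Int × Bool) f =>
        if f then
          (if ¬ st.2 then (st.1 + 1, true) else st)
        else
          (if st.2 then (st.1, false) else st)) (d, prev)).1
    = d + (((flags.zip (prev :: flags)).filter (fun fp => fp.1 && !fp.2)).length : Int) := by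
  induction flags generalizing d prev with
  | nil => simp
  | cons f fs ih =>
    have hst : (if f then
          (if ¬ (d, prev).2 then ((d, prev).1 + 1, true) else (d, prev))
        else
          (if (d, prev).2 then ((d, prev).1, false) else (d, prev)))
        = (d + (if f && !prev then 1 else 0), f) := by
      cases f <;> cases prev <;> simp
    simp only [List.foldl_cons, hst, ih, List.zip_cons_cons, List.filter_cons]
    cases f <;> cases prev <;> simp <;> omega

theorem flag_congr (t : List String) (w : String) :
    (!(PySem.Set.contains (PySem.Set.ofList t) w)) = (!(t.contains w)) := by
  have : PySem.Set.contains (PySem.Set.ofList t) w = t.contains w := by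
    by_cases h : w ∈ t
    · simp [PySem.Set.mem_ofList, h, List.contains_eq_mem]
    · simp [PySem.Set.mem_ofList, h, List.contains_eq_mem]
  rw [this]

-- ===== VERDICT (by name: the statement is the Claim_ definition above) =====
theorem count_missing_spec : Claim_equal_count_missing := by
  intro s1 r1 _
  show count_missing s1 r1 = count_missing_alt s1 r1
  unfold count_missing count_missing_alt
  set t := PySem.Str.split₀ (PySem.Str.join " " r1) with ht
  simp only [zip_cons_dropLast]
  have hmap : s1.map (fun w => !(PySem.Set.contains (PySem.Set.ofList t) w))
      = s1.map (fun w => !(t.contains w)) := by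
    simp only [flag_congr]
  rw [hmap]
  have hfold : s1.foldl (fun (st : Int × Bool) w =>
      if ¬ (t.contains w) then
        (if ¬ st.2 then (st.1 + 1, true) else st)
      else
        (if st.2 then (st.1, false) else st)) (0, false)
      = (s1.map (fun w => !(t.contains w))).foldl (fun (st : Int × Bool) f =>
        if f then
          (if ¬ st.2 then (st.1 + 1, true) else st)
        else
          (if st.2 then (st.1, false) else st)) (0, false) := by
    rw [List.foldl_map]
    apply PySem.List.foldl_congr_mem
    intro st w _
    by_cases h : t.contains w <;> simp [h]
  rw [hfold, foldA_eq]
  simp
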